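-- pv_equiv track=rewrite | github.com/HongruCai/PersonalWAB | PUMA/prepare_dpo_data.py | get_chosen_reject
-- ===== SOURCE A (Python) =====
-- def get_chosen_reject(options):
--     max_score = max(options.values())
--     min_score = min(options.values())
--     chosen = None
--     reject = None
--     for key, score in options.items():
--         if score == max_score and chosen is None:
--             chosen = key  # First max score encountered
--         if score == min_score:
--             reject = key
--     return chosen, reject
-- ===== SOURCE B (Python) =====
-- def get_chosen_reject(options):
--     items = iter(options.items())
--     key, score = next(items)
--     chosen, best = key, score
--     reject, worst = key, score
--     for key, score in items:
--         if score > best: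
--             chosen, best = key, score
--         if score <= worst:
--             reject, worst = key, score
--     return chosen, reject
-- ===== Notes on version B (the rewrite author's own statement) =====
-- stated objective: alternative
-- what changed: Single forward pass maintaining running argmax/argmin accumulators (strict '>' update keeps the first max key, non-strict '<=' update keeps the last min key), instead of A's staged passes that precompute max and min of the values and then scan the items against them.
import Mathlib
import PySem

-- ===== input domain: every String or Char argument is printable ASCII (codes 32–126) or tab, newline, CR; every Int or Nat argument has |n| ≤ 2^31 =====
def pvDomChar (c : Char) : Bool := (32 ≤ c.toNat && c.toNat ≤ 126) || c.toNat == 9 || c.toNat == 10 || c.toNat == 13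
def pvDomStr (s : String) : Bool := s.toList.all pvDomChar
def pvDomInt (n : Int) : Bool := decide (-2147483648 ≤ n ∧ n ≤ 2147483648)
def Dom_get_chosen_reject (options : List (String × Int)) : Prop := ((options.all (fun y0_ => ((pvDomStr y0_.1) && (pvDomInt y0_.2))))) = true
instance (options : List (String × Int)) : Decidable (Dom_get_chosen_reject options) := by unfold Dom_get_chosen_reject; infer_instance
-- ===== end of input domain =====

-- B replaces A's staged passes (precompute max and min of the values, then scan the items)
-- by a single forward pass with running argmax/argmin accumulators (strict '>' update keeps
-- the first max key, non-strict '<=' update keeps the last min key) — same result, one pass.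

-- ===== PORT A =====
def get_chosen_reject (options : List (String × Int)) : Option String × Option String :=
  match PySem.List.max? (options.map Prod.snd) (fun v => v),
        PySem.List.min? (options.map Prod.snd) (fun v => v) with
  | some maxScore, some minScore =>
      options.foldl (fun (st : Option String × Option String) kv =>
        (if kv.2 = maxScore ∧ st.1 = none then some kv.1 else st.1,
         if kv.2 = minScore then some kv.1 else st.2)) (none, none)
  | _, _ => (none, none)   -- unreachable under Pre_: Python raises ValueError on an empty dict

-- ===== PORT B =====
def get_chosen_reject_alt (options : List (String × Int)) : Option String × Option String :=
  match options with
  | [] => (none, none)   -- unreachable under Pre_: Python's next() raises StopIteration here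
  | (k, v) :: rest =>
      let st := rest.foldl (fun (st : (String × Int) × (String × Int)) kv =>
        ((if st.1.2 < kv.2 then kv else st.1),
         (if kv.2 ≤ st.2.2 then kv else st.2))) ((k, v), (k, v))
      (some st.1.1, some st.2.1)

-- ===== PRECONDITION & SPEC =====
-- Pre_ excludes the empty dict, on which A's max()/min() raise ValueError (B's next() raises
-- StopIteration too), and assoc lists with duplicate keys, which do not encode any Python dict input.
def Pre_get_chosen_reject (options : List (String × Int)) : Prop :=
  options ≠ [] ∧ (options.map Prod.fst).Nodup
instance (options : List (String × Int)) : Decidable (Pre_get_chosen_reject options) := by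
  unfold Pre_get_chosen_reject; infer_instance

def pvWitness_get_chosen_reject : (List (String × Int)) := [("a", 3), ("b", 1), ("c", 3)]

def Spec_get_chosen_reject (options : List (String × Int)) (out : Option String × Option String) : Prop := out = get_chosen_reject_alt options
instance (options : List (String × Int)) (out : Option String × Option String) : Decidable (Spec_get_chosen_reject options out) := by unfold Spec_get_chosen_reject; infer_instance

-- ===== CLAIM (what is proved, stated in full; the proofs are below) =====
def Claim_equal_get_chosen_reject : Prop := ∀ (options : List (String × Int)), Dom_get_chosen_reject options → Pre_get_chosen_reject options → Spec_get_chosen_reject options (get_chosen_reject options)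

-- ===== LEMMAS AND PROOFS =====

-- running argmax step (keeps the first maximum), Option-seeded and plain versions
def pvStepMax {α : Type} (key : α → Int) (acc : Option α) (x : α) : Option α :=
  match acc with
  | none => some x
  | some m => if key m < key x then some x else some m

def pvStepMaxP (s x : String × Int) : String × Int := if s.2 < x.2 then x else s

-- running last-argmin step (non-strict update keeps the last minimum)
def pvStepMinL {α : Type} (key : α → Int) (acc : Option α) (x : α) : Option α :=
  match acc with
  | none => some x
  | some m => if key x ≤ key m then some x else some m

def pvStepMinLP (s x : String × Int) : String × Int := if x.2 ≤ s.2 then x else s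

theorem pvBridgeMax :
    ∀ (l : List (String × Int)) (a : String × Int),
      l.foldl (pvStepMax Prod.snd) (some a) = some (l.foldl pvStepMaxP a) := by
  intro l
  induction l with
  | nil => intro a; rfl
  | cons x t ih =>
      intro a
      simp only [List.foldl_cons, pvStepMax, pvStepMaxP]
      by_cases h : a.2 < x.2
      · simp only [if_pos h]; exact ih x
      · simp only [if_neg h]; exact ih a

theorem pvBridgeMinL :
    ∀ (l : List (String × Int)) (a : String × Int),
      l.foldl (pvStepMinL Prod.snd) (some a) = some (l.foldl pvStepMinLP a) := by
  intro l
  induction l with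
  | nil => intro a; rfl
  | cons x t ih =>
      intro a
      simp only [List.foldl_cons, pvStepMinL, pvStepMinLP]
      by_cases h : x.2 ≤ a.2
      · simp only [if_pos h]; exact ih x
      · simp only [if_neg h]; exact ih a

-- a running max whose accumulator already dominates the rest never changes
theorem pvRunMax {α : Type} (key : α → Int) :
    ∀ (l : List α) (m : α), (∀ x ∈ l, key x ≤ key m) →
      l.foldl (pvStepMax key) (some m) = some m := by
  intro l
  induction l with
  | nil => intro m _; rfl
  | cons x t ih =>
      intro m h
      have hx : ¬ key m < key x := not_lt.mpr (h x (List.mem_cons_self))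
      simp only [List.foldl_cons, pvStepMax, if_neg hx]
      exact ih m (fun y hy => h y (List.mem_cons_of_mem _ hy))

-- the running max, started strictly below the global max M, ends at the FIRST element attaining M
theorem pvFoldMax_some {α : Type} (key : α → Int) (M : Int) :
    ∀ (l : List α) (a : α), key a < M → (∀ x ∈ l, key x ≤ M) → (∃ x ∈ l, key x = M) →
      l.foldl (pvStepMax key) (some a) = l.find? (fun x => key x == M) := by
  intro l
  induction l with
  | nil => intro a _ _ hex; obtain ⟨x, hx, _⟩ := hex; exact absurd hx (List.not_mem_nil)
  | cons x t ih =>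
      intro a ha hub hex
      by_cases hx : key x = M
      · have hlt : key a < key x := hx ▸ ha
        have h1 : pvStepMax key (some a) x = some x := by simp [pvStepMax, hlt]
        have h2 : (key x == M) = true := beq_iff_eq.mpr hx
        rw [List.foldl_cons, h1]
        simp only [List.find?_cons, h2]
        exact pvRunMax key t x (fun y hy => hx ▸ hub y (List.mem_cons_of_mem _ hy))
      · have hxlt : key x < M := lt_of_le_of_ne (hub x (List.mem_cons_self)) hx
        have hex' : ∃ y ∈ t, key y = M := by
          obtain ⟨y, hy, hyM⟩ := hex
          rcases List.mem_cons.mp hy with h | h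
          · exact absurd (h ▸ hyM) hx
          · exact ⟨y, h, hyM⟩
        have hub' : ∀ y ∈ t, key y ≤ M := fun y hy => hub y (List.mem_cons_of_mem _ hy)
        have h2 : (key x == M) = false := beq_eq_false_iff_ne.mpr hx
        rw [List.foldl_cons]
        simp only [List.find?_cons, h2]
        by_cases hax : key a < key x
        · have h1 : pvStepMax key (some a) x = some x := by simp [pvStepMax, hax]
          rw [h1]; exact ih x hxlt hub' hex'
        · have h1 : pvStepMax key (some a) x = some a := by simp [pvStepMax, hax]
          rw [h1]; exact ih a ha hub' hex'

theorem pvFoldMax_none {α : Type} (key : α → Int) (M : Int)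
    (l : List α) (hub : ∀ x ∈ l, key x ≤ M) (hex : ∃ x ∈ l, key x = M) :
    l.foldl (pvStepMax key) none = l.find? (fun x => key x == M) := by
  cases l with
  | nil => obtain ⟨x, hx, _⟩ := hex; exact absurd hx (List.not_mem_nil)
  | cons x t =>
      have h1 : pvStepMax key none x = some x := rfl
      rw [List.foldl_cons, h1]
      by_cases hx : key x = M
      · have h2 : (key x == M) = true := beq_iff_eq.mpr hx
        simp only [List.find?_cons, h2]
        exact pvRunMax key t x (fun y hy => hx ▸ hub y (List.mem_cons_of_mem _ hy))
      · have h2 : (key x == M) = false := beq_eq_false_iff_ne.mpr hx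
        have hxlt : key x < M := lt_of_le_of_ne (hub x (List.mem_cons_self)) hx
        have hex' : ∃ y ∈ t, key y = M := by
          obtain ⟨y, hy, hyM⟩ := hex
          rcases List.mem_cons.mp hy with h | h
          · exact absurd (h ▸ hyM) hx
          · exact ⟨y, h, hyM⟩
        simp only [List.find?_cons, h2]
        exact pvFoldMax_some key M t x hxlt (fun y hy => hub y (List.mem_cons_of_mem _ hy)) hex'

-- the running last-min, seeded with a, ends at the LAST element of a::l attaining the minimum m
theorem pvFoldMinL {α : Type} (key : α → Int) (m : Int) :
    ∀ (l : List α) (a : α), m ≤ key a → (∀ x ∈ l, m ≤ key x) →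
      (key a = m ∨ ∃ x ∈ l, key x = m) →
      l.foldl (pvStepMinL key) (some a) = (a :: l).reverse.find? (fun x => key x == m) := by
  intro l
  induction l with
  | nil =>
      intro a _ _ hex
      have ha : key a = m := by
        rcases hex with h | h
        · exact h
        · obtain ⟨x, hx, _⟩ := h; exact absurd hx (List.not_mem_nil)
      simp [beq_iff_eq.mpr ha]
  | cons x t ih =>
      intro a ha hlb hex
      have hxm : m ≤ key x := hlb x (List.mem_cons_self)
      have hrev : (a :: x :: t).reverse = (x :: t).reverse ++ [a] := by
        simp
      by_cases hstep : key x ≤ key a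
      · have h1 : pvStepMinL key (some a) x = some x := by simp [pvStepMinL, hstep]
        rw [List.foldl_cons, h1]
        have hex' : key x = m ∨ ∃ y ∈ t, key y = m := by
          by_cases hx : key x = m
          · exact Or.inl hx
          · rcases hex with h | h
            · -- key a = m, but key x ≤ key a and m ≤ key x force key x = m
              exact Or.inl (le_antisymm (h ▸ hstep) hxm)
            · obtain ⟨y, hy, hym⟩ := h
              rcases List.mem_cons.mp hy with h' | h'
              · exact absurd (h' ▸ hym) hx
              · exact Or.inr ⟨y, h', hym⟩
        have := ih x hxm (fun y hy => hlb y (List.mem_cons_of_mem _ hy)) hex'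
        rw [this, hrev, List.find?_append]
        -- the left part (x :: t).reverse always finds a hit, so the .or is absorbed
        have hsome : ((x :: t).reverse.find? (fun y => key y == m)).isSome := by
          rw [List.find?_isSome]
          rcases hex' with h | h
          · exact ⟨x, List.mem_reverse.mpr List.mem_cons_self, beq_iff_eq.mpr h⟩
          · obtain ⟨y, hy, hym⟩ := h
            exact ⟨y, List.mem_reverse.mpr (List.mem_cons_of_mem _ hy), beq_iff_eq.mpr hym⟩
        obtain ⟨c, hc⟩ := Option.isSome_iff_exists.mp hsome
        rw [hc]; rfl
      · have h1 : pvStepMinL key (some a) x = some a := by simp [pvStepMinL, hstep]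
        rw [List.foldl_cons, h1]
        have hxne : (key x == m) = false := by
          apply beq_eq_false_iff_ne.mpr
          intro h
          exact hstep (h ▸ (le_trans (h ▸ le_refl (key x)) (h ▸ ha)))
        have hex' : key a = m ∨ ∃ y ∈ t, key y = m := by
          rcases hex with h | h
          · exact Or.inl h
          · obtain ⟨y, hy, hym⟩ := h
            rcases List.mem_cons.mp hy with h' | h'
            · exact absurd (h' ▸ hym) (beq_eq_false_iff_ne.mp hxne)
            · exact Or.inr ⟨y, h', hym⟩
        have := ih a ha (fun y hy => hlb y (List.mem_cons_of_mem _ hy)) hex'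
        rw [this, hrev]
        have hrev2 : (a :: t).reverse = t.reverse ++ [a] := by simp
        rw [hrev2]
        have : (x :: t).reverse = t.reverse ++ [x] := by simp
        rw [this, List.find?_append, List.find?_append, List.find?_append]
        simp [List.find?, hxne]

-- the two components of A's loop state, as named step functions
def pvStepC (M : Int) (c : Option String) (kv : String × Int) : Option String :=
  if kv.2 = M ∧ c = none then some kv.1 else c

def pvStepR (m : Int) (r : Option String) (kv : String × Int) : Option String :=
  if kv.2 = m then some kv.1 else r

-- A's pair-state loop splits into the two independent component folds
theorem pvSplit (M m : Int) :
    ∀ (l : List (String × Int)) (c0 r0 : Option String),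
      l.foldl (fun (st : Option String × Option String) kv =>
          (if kv.2 = M ∧ st.1 = none then some kv.1 else st.1,
           if kv.2 = m then some kv.1 else st.2)) (c0, r0)
      = (l.foldl (pvStepC M) c0, l.foldl (pvStepR m) r0) := by
  intro l
  induction l with
  | nil => intro c0 r0; rfl
  | cons kv t ih =>
      intro c0 r0
      simp only [List.foldl_cons]
      exact ih (pvStepC M c0 kv) (pvStepR m r0 kv)

-- B's pair-state loop splits into the two independent component folds too
theorem pvSplitB :
    ∀ (l : List (String × Int)) (s1 s2 : String × Int),
      l.foldl (fun (st : (String × Int) × (String × Int)) kv =>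
          ((if st.1.2 < kv.2 then kv else st.1),
           (if kv.2 ≤ st.2.2 then kv else st.2))) (s1, s2)
      = (l.foldl pvStepMaxP s1, l.foldl pvStepMinLP s2) := by
  intro l
  induction l with
  | nil => intro s1 s2; rfl
  | cons kv t ih =>
      intro s1 s2
      simp only [List.foldl_cons]
      exact ih (pvStepMaxP s1 kv) (pvStepMinLP s2 kv)

-- once A's chosen slot is set it never changes
theorem pvChosenStay (M : Int) :
    ∀ (l : List (String × Int)) (s : String),
      l.foldl (pvStepC M) (some s) = some s := by
  intro l
  induction l with
  | nil => intro s; rfl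
  | cons kv t ih =>
      intro s
      have h1 : pvStepC M (some s) kv = some s := by simp [pvStepC]
      rw [List.foldl_cons, h1]
      exact ih s

-- A's chosen slot ends at the FIRST pair whose value is M
theorem pvChosenFold (M : Int) :
    ∀ (l : List (String × Int)),
      l.foldl (pvStepC M) none = (l.find? (fun kv => kv.2 == M)).map Prod.fst := by
  intro l
  induction l with
  | nil => rfl
  | cons kv t ih =>
      by_cases hM : kv.2 = M
      · have h1 : pvStepC M none kv = some kv.1 := by simp [pvStepC, hM]
        have h2 : (kv.2 == M) = true := beq_iff_eq.mpr hM
        rw [List.foldl_cons, h1]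
        simp only [List.find?_cons, h2, Option.map_some]
        exact pvChosenStay M t kv.1
      · have h1 : pvStepC M none kv = none := by simp [pvStepC, hM]
        have h2 : (kv.2 == M) = false := beq_eq_false_iff_ne.mpr hM
        rw [List.foldl_cons, h1]
        simp only [List.find?_cons, h2]
        exact ih

-- A's reject slot ends at the LAST pair whose value is m (first in the reversed list)
theorem pvRejectFold (m : Int) :
    ∀ (l : List (String × Int)) (r0 : Option String),
      l.foldl (pvStepR m) r0 = ((l.reverse.find? (fun kv => kv.2 == m)).map Prod.fst).or r0 := by
  intro l
  induction l with
  | nil => intro r0; rfl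
  | cons kv t ih =>
      intro r0
      rw [List.foldl_cons, ih, List.reverse_cons, List.find?_append, Option.map_or, Option.or_assoc]
      congr 1
      by_cases hm : kv.2 = m
      · simp [pvStepR, List.find?, hm]
      · simp [pvStepR, List.find?, beq_eq_false_iff_ne.mpr hm, hm]

-- ===== VERDICT (by name: the statement is the Claim_ definition above) =====
theorem get_chosen_reject_spec : Claim_equal_get_chosen_reject := by
  intro options _ hpre
  obtain ⟨hne, _⟩ := hpre
  unfold Spec_get_chosen_reject
  match options, hne with
  | (k, v) :: rest, _ =>
    set opts := (k, v) :: rest with hopts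
    have hvs : opts.map Prod.snd ≠ [] := by simp [hopts]
    obtain ⟨M, hM⟩ : ∃ M, PySem.List.max? (opts.map Prod.snd) (fun v => v) = some M := by
      cases h : PySem.List.max? (opts.map Prod.snd) (fun v => v) with
      | none => exact absurd ((PySem.List.max?_eq_none_iff _ _).mp h) hvs
      | some M => exact ⟨M, rfl⟩
    obtain ⟨m, hm⟩ : ∃ m, PySem.List.min? (opts.map Prod.snd) (fun v => v) = some m := by
      cases h : PySem.List.min? (opts.map Prod.snd) (fun v => v) with
      | none => exact absurd ((PySem.List.min?_eq_none_iff _ _).mp h) hvs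
      | some m => exact ⟨m, rfl⟩
    have hub : ∀ kv ∈ opts, kv.2 ≤ M :=
      fun kv hkv => PySem.List.max?_isMax hM kv.2 (List.mem_map_of_mem hkv)
    have hlb : ∀ kv ∈ opts, m ≤ kv.2 :=
      fun kv hkv => PySem.List.min?_isMin hm kv.2 (List.mem_map_of_mem hkv)
    have hexM : ∃ kv ∈ opts, kv.2 = M := by
      obtain ⟨kv, hkv, hv⟩ := List.mem_map.mp (PySem.List.max?_mem hM)
      exact ⟨kv, hkv, hv⟩
    have hexm : ∃ kv ∈ opts, kv.2 = m := by
      obtain ⟨kv, hkv, hv⟩ := List.mem_map.mp (PySem.List.min?_mem hm)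
      exact ⟨kv, hkv, hv⟩
    -- A's value, characterised
    have hA : get_chosen_reject opts =
        ((opts.find? (fun kv => kv.2 == M)).map Prod.fst,
         (opts.reverse.find? (fun kv => kv.2 == m)).map Prod.fst) := by
      unfold get_chosen_reject
      simp only [hM, hm]
      rw [pvSplit M m opts none none, pvChosenFold M opts, pvRejectFold m opts none,
        Option.or_none]
    -- B's value, characterised
    have hBmax : some (rest.foldl pvStepMaxP (k, v)) = opts.find? (fun kv => kv.2 == M) := by
      rw [← pvBridgeMax rest (k, v)]
      have h0 : pvStepMax (Prod.snd) (none : Option (String × Int)) (k, v) = some (k, v) := rfl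
      calc rest.foldl (pvStepMax Prod.snd) (some (k, v))
          = opts.foldl (pvStepMax Prod.snd) none := by rw [hopts, List.foldl_cons, h0]
        _ = opts.find? (fun kv => kv.2 == M) :=
            pvFoldMax_none Prod.snd M opts hub hexM
    have hBmin : some (rest.foldl pvStepMinLP (k, v)) = opts.reverse.find? (fun kv => kv.2 == m) := by
      rw [← pvBridgeMinL rest (k, v)]
      have hv' : m ≤ v := hlb (k, v) (by rw [hopts]; exact List.mem_cons_self)
      have hlb' : ∀ x ∈ rest, m ≤ x.2 :=
        fun x hx => hlb x (by rw [hopts]; exact List.mem_cons_of_mem _ hx)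
      have hex' : (k, v).2 = m ∨ ∃ x ∈ rest, x.2 = m := by
        obtain ⟨kv, hkv, hkvm⟩ := hexm
        rw [hopts] at hkv
        rcases List.mem_cons.mp hkv with h | h
        · exact Or.inl (h ▸ hkvm)
        · exact Or.inr ⟨kv, h, hkvm⟩
      exact pvFoldMinL Prod.snd m rest (k, v) hv' hlb' hex'
    rw [hA]
    unfold get_chosen_reject_alt
    rw [hopts]
    simp only []
    rw [pvSplitB rest (k, v) (k, v)]
    rw [← hopts, ← hBmax, ← hBmin]
    rfl
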